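-- pv_equiv track=rewrite | github.com/TrueJacobG/Text-Adventure-Game-Engine | main.py | moveElementInDict
-- ===== SOURCE A (Python) =====
-- def moveElementInDict(di, key):
--     queue = []
--     result = {}
--     for item in di.items():
--         if item[0] == key:
--             result[item[0]] = item[1]
--             continue
--         queue.append(item)
--
--     for item in queue:
--         result[item[0]] = item[1]
--
--     return result
-- ===== SOURCE B (Python) =====
-- def moveElementInDict(di, key):
--     result = dict(di)
--     try:
--         val = result.pop(key)
--     except KeyError:
--         return result
--     return {key: val, **result}
-- ===== Notes on version B (the rewrite author's own statement) =====
-- stated objective: idiomatic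
-- what changed: B copies the dict and pops the key (try/except), prepending the popped entry via {key: val, **result}, instead of A's two-pass queue/result partition loop.
import Mathlib
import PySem

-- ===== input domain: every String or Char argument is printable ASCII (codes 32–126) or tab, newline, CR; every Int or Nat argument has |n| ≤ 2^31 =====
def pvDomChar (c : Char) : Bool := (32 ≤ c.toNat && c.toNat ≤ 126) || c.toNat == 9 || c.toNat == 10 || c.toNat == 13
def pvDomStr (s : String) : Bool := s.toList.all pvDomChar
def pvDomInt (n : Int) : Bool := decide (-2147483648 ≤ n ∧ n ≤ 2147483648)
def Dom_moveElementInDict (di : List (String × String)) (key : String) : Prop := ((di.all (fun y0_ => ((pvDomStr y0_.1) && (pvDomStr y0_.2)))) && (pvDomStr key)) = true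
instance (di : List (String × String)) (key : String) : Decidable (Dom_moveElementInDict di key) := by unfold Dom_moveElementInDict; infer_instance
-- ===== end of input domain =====

-- B (idiomatic, same cost): copy the dict, pop the key, prepend the popped entry — instead of
-- A's queue/result partition with two populating loops.

-- ===== PORT A =====
-- A: one loop over di.items() appending non-matching items to `queue` and inserting matching
-- ones into `result`; then a second loop inserting the queue into `result`.
def moveElementInDict (di : List (String × String)) (key : String) : List (String × String) :=
  let p := di.foldl
    (fun (acc : List (String × String) × PySem.Dict String String) item =>
      if item.1 == key then (acc.1, acc.2.insert item.1 item.2)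
      else (acc.1 ++ [item], acc.2))
    ([], PySem.Dict.empty)
  (p.1.foldl (fun r item => r.insert item.1 item.2) p.2).items

-- ===== PORT B =====
-- B: result = dict(di); try val = result.pop(key) except KeyError: return result;
-- return {key: val, **result}
def moveElementInDict_alt (di : List (String × String)) (key : String) : List (String × String) :=
  match (PySem.Dict.mk di).pop? key with
  | none => di
  | some (val, rest) => (key, val) :: rest.items

-- ===== PRECONDITION & SPEC =====
-- Pre_ excludes association lists with duplicate keys: they encode no Python dict (the dict
-- argument collapses duplicates before either function runs), so behaviour there is an
-- artefact of the encoding, not of A.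
def Pre_moveElementInDict (di : List (String × String)) (key : String) : Prop :=
  (di.map Prod.fst).Nodup
instance (di : List (String × String)) (key : String) : Decidable (Pre_moveElementInDict di key) := by unfold Pre_moveElementInDict; infer_instance

def pvWitness_moveElementInDict : (List (String × String)) × String :=
  ([("a", "1"), ("b", "2"), ("c", "3")], "b")

def Spec_moveElementInDict (di : List (String × String)) (key : String) (out : List (String × String)) : Prop := out = moveElementInDict_alt di key
instance (di : List (String × String)) (key : String) (out : List (String × String)) : Decidable (Spec_moveElementInDict di key out) := by unfold Spec_moveElementInDict; infer_instance

-- ===== CLAIM (what is proved, stated in full; the proofs are below) =====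
def Claim_equal_moveElementInDict : Prop := ∀ (di : List (String × String)) (key : String), Dom_moveElementInDict di key → Pre_moveElementInDict di key → Spec_moveElementInDict di key (moveElementInDict di key)

-- ===== LEMMAS AND PROOFS =====

-- first component of A's first loop: the non-matching items, appended in order
theorem fstFold (key : String) (di : List (String × String))
    (q : List (String × String)) (r : PySem.Dict String String) :
    (di.foldl
      (fun (acc : List (String × String) × PySem.Dict String String) item =>
        if item.1 == key then (acc.1, acc.2.insert item.1 item.2)
        else (acc.1 ++ [item], acc.2)) (q, r)).1
    = q ++ di.filter (fun it => !(it.1 == key)) := by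
  induction di generalizing q r with
  | nil => simp
  | cons x xs ih =>
    simp only [List.foldl_cons]
    by_cases h : x.1 = key
    · rw [if_pos (by simpa using h), ih]
      simp [h]
    · rw [if_neg (by simpa using h), ih]
      simp [h]

-- second component of A's first loop: the matching items inserted in order
theorem sndFold (key : String) (di : List (String × String))
    (q : List (String × String)) (r : PySem.Dict String String) :
    (di.foldl
      (fun (acc : List (String × String) × PySem.Dict String String) item =>
        if item.1 == key then (acc.1, acc.2.insert item.1 item.2)
        else (acc.1 ++ [item], acc.2)) (q, r)).2
    = (di.filter (fun it => it.1 == key)).foldl (fun d it => d.insert it.1 it.2) r := by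
  induction di generalizing q r with
  | nil => simp
  | cons x xs ih =>
    simp only [List.foldl_cons]
    by_cases h : x.1 = key
    · rw [if_pos (by simpa using h), ih]
      simp [h]
    · rw [if_neg (by simpa using h), ih]
      simp [h]

theorem moveElementInDict_spec' (di : List (String × String)) (key : String)
    (hnd : (di.map Prod.fst).Nodup) :
    moveElementInDict di key = moveElementInDict_alt di key := by
  rcases hfind : (di.find? (fun p => p.1 == key)) with _ | ⟨k0, v0⟩
  · -- no entry has the key
    have hnone : ∀ it ∈ di, ¬ (it.1 = key) := by
      intro it hit hk
      have := List.find?_eq_none.mp hfind it hit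
      simp [hk] at this
    have hfilt1 : di.filter (fun it => it.1 == key) = [] := by
      apply List.filter_eq_nil_iff.mpr; intro it hit; simpa using hnone it hit
    have hfilt2 : di.filter (fun it => !(it.1 == key)) = di := by
      apply List.filter_eq_self.mpr; intro it hit; simpa using hnone it hit
    unfold moveElementInDict moveElementInDict_alt
    simp only [fstFold, sndFold, PySem.Dict.pop?, PySem.Dict.get?, hfind]
    rw [hfilt1, hfilt2]
    simp only [List.foldl_nil, List.nil_append]
    rw [PySem.Dict.items_foldl_insert_fresh (k := Prod.fst) (v := Prod.snd)]
    · simp [PySem.Dict.empty]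
    · intro a _; simp [PySem.Dict.contains_empty]
    · exact hnd
  · -- the key is present: split di around the found entry
    obtain ⟨hpk, xs, ys, hdi, hxs⟩ := List.find?_eq_some_iff_append.mp hfind
    have hk0 : k0 = key := by simpa using hpk
    have hxs' : ∀ it ∈ xs, ¬ (it.1 = key) := by
      intro it hit hk
      have := hxs it hit
      simp [hk] at this
    subst hdi
    have hnd' := hnd
    simp only [List.map_append, List.map_cons, List.nodup_append, List.nodup_cons] at hnd'
    have hys' : ∀ it ∈ ys, ¬ (it.1 = key) := by
      intro it hit hk
      rw [← hk0] at hk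
      exact hnd'.2.1.1 (List.mem_map.mpr ⟨it, hit, hk⟩)
    have hfiltm : (xs ++ (k0, v0) :: ys).filter (fun it => it.1 == key) = [(k0, v0)] := by
      rw [List.filter_append]
      have h1 : xs.filter (fun it => it.1 == key) = [] :=
        List.filter_eq_nil_iff.mpr (by intro it hit; simpa using hxs' it hit)
      have h2 : ys.filter (fun it => it.1 == key) = [] :=
        List.filter_eq_nil_iff.mpr (by intro it hit; simpa using hys' it hit)
      simp [h1, h2, hk0]
    have hfiltn : (xs ++ (k0, v0) :: ys).filter (fun it => !(it.1 == key)) = xs ++ ys := by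
      rw [List.filter_append]
      have h1 : xs.filter (fun it => !(it.1 == key)) = xs :=
        List.filter_eq_self.mpr (by intro it hit; simpa using hxs' it hit)
      have h2 : ys.filter (fun it => !(it.1 == key)) = ys :=
        List.filter_eq_self.mpr (by intro it hit; simpa using hys' it hit)
      simp [h1, h2, hk0]
    have hfresh : ∀ a ∈ xs ++ ys, (PySem.Dict.empty.insert k0 v0).contains a.1 = false := by
      intro a ha
      have hak : ¬ (a.1 = key) := by
        rcases List.mem_append.mp ha with h | h
        · exact hxs' a h
        · exact hys' a h
      rw [hk0]
      simp [PySem.Dict.insert, PySem.Dict.empty, PySem.Dict.contains]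
      exact fun h => hak h.symm
    have hsub : ((xs ++ ys).map Prod.fst).Nodup := by
      have : ((xs ++ ys).map Prod.fst).Sublist ((xs ++ (k0, v0) :: ys).map Prod.fst) := by
        simp only [List.map_append, List.map_cons]
        exact (List.sublist_cons_self _ _).append_left _
      exact hnd.sublist this
    unfold moveElementInDict moveElementInDict_alt
    simp only [fstFold, sndFold, PySem.Dict.pop?, PySem.Dict.get?, hfind]
    rw [hfiltm, hfiltn]
    simp only [List.foldl_cons, List.foldl_nil, List.nil_append, Option.map_some]
    rw [PySem.Dict.items_foldl_insert_fresh (xs ++ ys) Prod.fst Prod.snd (PySem.Dict.empty.insert k0 v0) hfresh hsub]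
    simp [PySem.Dict.insert, PySem.Dict.empty, PySem.Dict.erase, PySem.Dict.contains, hk0]
    rw [List.filter_eq_self.mpr (by intro it hit; simpa using hxs' it hit),
        List.filter_eq_self.mpr (by intro it hit; simpa using hys' it hit)]

-- ===== VERDICT (by name: the statement is the Claim_ definition above) =====
theorem moveElementInDict_spec : Claim_equal_moveElementInDict := by
  intro di key _ hpre
  exact moveElementInDict_spec' di key hpre
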